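-- pv_equiv track=rewrite | github.com/marianarestrepo26/PythonExercises | nivel3/Ejercicio_16.py | verify_password
-- ===== SOURCE A (Python) =====
-- def verify_password(password):
--
--     if not 6 <= len(password) <= 12:
--         return False
--
--     numbers = 0
--     capitals = 0
--     lower = 0
--     symbols = 0
--
--     for caracter in password:
--         if caracter.isspace():
--             return False
--         elif caracter.isdigit():
--             numbers += 1
--         elif caracter.isupper():
--             capitals += 1
--         elif caracter.islower():
--             lower += 1
--         else:
--             symbols += 1
--
--     return numbers >= 1 and capitals !=0 and lower >= 1 and symbols >= 1
-- ===== SOURCE B (Python) =====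
-- def verify_password(password):
--     if not 6 <= len(password) <= 12:
--         return False
--     if any(c.isspace() for c in password):
--         return False
--     has_digit = any(c.isdigit() for c in password)
--     has_upper = any(c.isupper() for c in password)
--     has_lower = any(c.islower() for c in password)
--     has_symbol = any(not (c.isdigit() or c.isupper() or c.islower()) for c in password)
--     return has_digit and has_upper and has_lower and has_symbol
-- ===== Notes on version B (the rewrite author's own statement) =====
-- stated objective: idiomatic
-- what changed: Replaced the single accumulating pass that buckets characters into four counters with a whitespace rejection followed by four independent any()-scans, one per required character class.
import Mathlib
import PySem

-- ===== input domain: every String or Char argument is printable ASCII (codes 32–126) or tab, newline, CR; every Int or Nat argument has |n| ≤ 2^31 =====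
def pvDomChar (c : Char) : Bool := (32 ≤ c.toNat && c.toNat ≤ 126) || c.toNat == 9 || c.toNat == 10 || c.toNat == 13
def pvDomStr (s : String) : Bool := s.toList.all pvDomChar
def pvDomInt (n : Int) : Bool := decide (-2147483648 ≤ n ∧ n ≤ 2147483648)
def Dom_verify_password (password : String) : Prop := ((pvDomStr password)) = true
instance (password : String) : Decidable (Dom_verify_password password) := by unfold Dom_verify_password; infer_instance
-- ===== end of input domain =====

-- B replaces A's single counter-accumulating pass with one whitespace scan plus four independent any-scans (idiomatic decomposition).

-- ===== PORT A =====
def vpLoop : List Char → Int → Int → Int → Int → Bool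
  | [], numbers, capitals, lower, symbols =>
      decide (1 ≤ numbers) && decide (capitals ≠ 0) && decide (1 ≤ lower) && decide (1 ≤ symbols)
  | ch :: rest, numbers, capitals, lower, symbols =>
      if PySem.Chars.isspace ch then false
      else if PySem.Chars.isdigit ch then vpLoop rest (numbers + 1) capitals lower symbols
      else if PySem.Chars.isupper ch then vpLoop rest numbers (capitals + 1) lower symbols
      else if PySem.Chars.islower ch then vpLoop rest numbers capitals (lower + 1) symbols
      else vpLoop rest numbers capitals lower (symbols + 1)

def verify_password (password : String) : Bool :=
  if ¬ (6 ≤ PySem.Str.len password ∧ PySem.Str.len password ≤ 12) then false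
  else vpLoop password.toList 0 0 0 0

-- ===== PORT B =====
def verify_password_alt (password : String) : Bool :=
  if ¬ (6 ≤ PySem.Str.len password ∧ PySem.Str.len password ≤ 12) then false
  else if password.toList.any PySem.Chars.isspace then false
  else
    password.toList.any PySem.Chars.isdigit &&
    password.toList.any PySem.Chars.isupper &&
    password.toList.any PySem.Chars.islower &&
    password.toList.any (fun c => !(PySem.Chars.isdigit c || PySem.Chars.isupper c || PySem.Chars.islower c))

-- ===== PRECONDITION & SPEC =====
def Spec_verify_password (password : String) (out : Bool) : Prop := out = verify_password_alt password
instance (password : String) (out : Bool) : Decidable (Spec_verify_password password out) := by unfold Spec_verify_password; infer_instance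

-- ===== CLAIM (what is proved, stated in full; the proofs are below) =====
def Claim_equal_verify_password : Prop := ∀ (password : String), Dom_verify_password password → Spec_verify_password password (verify_password password)

-- ===== LEMMAS AND PROOFS =====
lemma digit_classes (c : Char) (h : PySem.Chars.isdigit c = true) :
    PySem.Chars.isupper c = false ∧ PySem.Chars.islower c = false := by
  unfold PySem.Chars.isdigit at h
  unfold PySem.Chars.isupper PySem.Chars.islower
  have h0 : '0'.val.toNat = 48 := rfl
  have h9 : '9'.val.toNat = 57 := rfl
  have hA : 'A'.val.toNat = 65 := rfl
  have hZ : 'Z'.val.toNat = 90 := rfl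
  have ha : 'a'.val.toNat = 97 := rfl
  have hz : 'z'.val.toNat = 122 := rfl
  simp only [Bool.and_eq_true, decide_eq_true_eq, Char.le_def, UInt32.le_iff_toNat_le,
    Bool.and_eq_false_iff, decide_eq_false_iff_not, not_le, h0, h9, hA, hZ, ha, hz] at *
  omega

lemma upper_not_lower (c : Char) (h : PySem.Chars.isupper c = true) :
    PySem.Chars.islower c = false := by
  unfold PySem.Chars.isupper at h
  unfold PySem.Chars.islower
  have hA : 'A'.val.toNat = 65 := rfl
  have hZ : 'Z'.val.toNat = 90 := rfl
  have ha : 'a'.val.toNat = 97 := rfl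
  have hz : 'z'.val.toNat = 122 := rfl
  simp only [Bool.and_eq_true, decide_eq_true_eq, Char.le_def, UInt32.le_iff_toNat_le,
    Bool.and_eq_false_iff, decide_eq_false_iff_not, not_le, hA, hZ, ha, hz] at *
  omega

lemma vpLoop_eq (cs : List Char) : ∀ (n c l s : Int), 0 ≤ n → 0 ≤ c → 0 ≤ l → 0 ≤ s →
    vpLoop cs n c l s =
      (!cs.any PySem.Chars.isspace &&
       ((decide (1 ≤ n) || cs.any PySem.Chars.isdigit) &&
        (decide (1 ≤ c) || cs.any PySem.Chars.isupper) &&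
        (decide (1 ≤ l) || cs.any PySem.Chars.islower) &&
        (decide (1 ≤ s) || cs.any (fun ch => !(PySem.Chars.isdigit ch || PySem.Chars.isupper ch || PySem.Chars.islower ch))))) := by
  induction cs with
  | nil =>
    intro n c l s hn hc hl hs
    simp only [vpLoop, List.any_nil, Bool.or_false, Bool.not_false, Bool.true_and]
    have : decide (c ≠ 0) = decide (1 ≤ c) := by
      simp only [decide_eq_decide]; omega
    rw [this]
  | cons ch rest ih =>
    intro n c l s hn hc hl hs
    simp only [vpLoop, List.any_cons]
    by_cases hsp : PySem.Chars.isspace ch = true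
    · simp [hsp]
    · replace hsp : PySem.Chars.isspace ch = false := by simpa using hsp
      rw [if_neg (by simp [hsp])]
      by_cases hd : PySem.Chars.isdigit ch = true
      · obtain ⟨hu, hl'⟩ := digit_classes ch hd
        rw [if_pos hd, ih (n+1) c l s (by omega) hc hl hs]
        simp [hsp, hd, hu, hl', hn]
      · replace hd : PySem.Chars.isdigit ch = false := by simpa using hd
        rw [if_neg (by simp [hd])]
        by_cases hu : PySem.Chars.isupper ch = true
        · have hl' := upper_not_lower ch hu
          rw [if_pos hu, ih n (c+1) l s hn (by omega) hl hs]
          simp [hsp, hd, hu, hl', hc]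
        · replace hu : PySem.Chars.isupper ch = false := by simpa using hu
          rw [if_neg (by simp [hu])]
          by_cases hlo : PySem.Chars.islower ch = true
          · rw [if_pos hlo, ih n c (l+1) s hn hc (by omega) hs]
            simp [hsp, hd, hu, hlo, hl]
          · replace hlo : PySem.Chars.islower ch = false := by simpa using hlo
            rw [if_neg (by simp [hlo]), ih n c l (s+1) hn hc hl (by omega)]
            simp [hsp, hd, hu, hlo, hs]

-- ===== VERDICT (by name: the statement is the Claim_ definition above) =====
theorem verify_password_spec : Claim_equal_verify_password := by
  intro password _
  unfold Spec_verify_password verify_password verify_password_alt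
  by_cases hlen : ¬ (6 ≤ PySem.Str.len password ∧ PySem.Str.len password ≤ 12)
  · rw [if_pos hlen, if_pos hlen]
  · rw [if_neg hlen, if_neg hlen,
      vpLoop_eq password.toList 0 0 0 0 le_rfl le_rfl le_rfl le_rfl]
    by_cases hsp : password.toList.any PySem.Chars.isspace = true
    · simp [hsp]
    · replace hsp : password.toList.any PySem.Chars.isspace = false := by simpa using hsp
      simp [hsp]
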